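-- pv_equiv track=rewrite | github.com/pedrolemeeee/PedroLuiz | funcoes.py | calcula_pontos_sequencia_baixa
-- ===== SOURCE A (Python) =====
-- def calcula_pontos_sequencia_baixa(dados):
--     dados_unicos = []
--     for numero in dados:
--         if numero not in dados_unicos:
--             dados_unicos.append(numero)
--     dados_ordenados = sorted(dados_unicos)
--
--     contador = 1
--     for i in range(1, len(dados_ordenados)):
--         if dados_ordenados[i] == dados_ordenados[i - 1] + 1:
--             contador = contador + 1
--             if contador >= 4:
--                 return 15
--         else:
--             contador = 1
--     return 0
-- ===== SOURCE B (Python) =====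
-- def calcula_pontos_sequencia_baixa(dados):
--     s = set(dados)
--     for x in s:
--         if x + 1 in s and x + 2 in s and x + 3 in s:
--             return 15
--     return 0
-- ===== Notes on version B (the rewrite author's own statement) =====
-- stated objective: faster
-- what changed: Replaces the O(n^2) list-dedup plus sort-and-scan with a hash set and a direct existence test for x, x+1, x+2, x+3 in the set (no sort, no counter).
import Mathlib
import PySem

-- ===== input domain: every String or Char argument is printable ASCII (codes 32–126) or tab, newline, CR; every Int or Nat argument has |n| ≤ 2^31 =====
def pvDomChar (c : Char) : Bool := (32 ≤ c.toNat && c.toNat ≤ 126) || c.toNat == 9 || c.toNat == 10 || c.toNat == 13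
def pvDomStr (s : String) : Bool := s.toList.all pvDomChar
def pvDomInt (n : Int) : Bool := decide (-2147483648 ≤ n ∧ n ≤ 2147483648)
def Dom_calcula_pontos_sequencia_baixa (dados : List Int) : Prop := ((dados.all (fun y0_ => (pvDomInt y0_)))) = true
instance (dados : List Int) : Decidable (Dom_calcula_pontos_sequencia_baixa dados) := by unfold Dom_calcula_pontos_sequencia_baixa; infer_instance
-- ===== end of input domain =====

-- B replaces A's O(n^2) list dedup + sort-and-scan with a set and a direct
-- existence test for x, x+1, x+2, x+3 (objective: faster, asymptotic).

-- ===== PORT A =====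
-- the 'for i in range(1, len)' counter scan, as structural recursion over the
-- tail with state (previous element, contador); early 'return 15' kept
def pvScanA : Int → Int → List Int → Int
  | _, _, [] => 0
  | prev, cnt, x :: xs =>
      if x = prev + 1 then
        (if cnt + 1 ≥ 4 then 15 else pvScanA x (cnt + 1) xs)
      else pvScanA x 1 xs

def calcula_pontos_sequencia_baixa (dados : List Int) : Int :=
  let dados_unicos := dados.foldl (fun acc numero => if acc.contains numero then acc else acc ++ [numero]) []
  let dados_ordenados := PySem.List.sorted dados_unicos (fun x => x) false
  match dados_ordenados with
  | [] => 0
  | a :: rest => pvScanA a 1 rest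

-- ===== PORT B =====
def calcula_pontos_sequencia_baixa_alt (dados : List Int) : Int :=
  let s := PySem.Set.ofList dados
  if s.any (fun x => s.contains (x + 1) && s.contains (x + 2) && s.contains (x + 3)) then 15 else 0

-- ===== PRECONDITION & SPEC =====
def Spec_calcula_pontos_sequencia_baixa (dados : List Int) (out : Int) : Prop := out = calcula_pontos_sequencia_baixa_alt dados
instance (dados : List Int) (out : Int) : Decidable (Spec_calcula_pontos_sequencia_baixa dados out) := by unfold Spec_calcula_pontos_sequencia_baixa; infer_instance

-- ===== CLAIM (what is proved, stated in full; the proofs are below) =====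
def Claim_equal_calcula_pontos_sequencia_baixa : Prop := ∀ (dados : List Int), Dom_calcula_pontos_sequencia_baixa dados → Spec_calcula_pontos_sequencia_baixa dados (calcula_pontos_sequencia_baixa dados)

-- ===== LEMMAS AND PROOFS =====

-- 'xs begins with prev+1, prev+2, …, prev+k'
def pvRunP : Nat → Int → List Int → Bool
  | 0, _, _ => true
  | _ + 1, _, [] => false
  | k + 1, prev, x :: xs => x == prev + 1 && pvRunP k x xs

-- 'l contains a window of 4 consecutive increasing-by-1 entries'
def pvQuad : List Int → Bool
  | [] => false
  | x :: xs => pvRunP 3 x xs || pvQuad xs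

theorem pvRunP_succ (k : Nat) : ∀ (p : Int) (xs : List Int),
    pvRunP (k + 1) p xs = true → pvRunP k p xs = true := by
  induction k with
  | zero => intro p xs _; rfl
  | succ k ih =>
    intro p xs h
    cases xs with
    | nil => simp [pvRunP] at h
    | cons x xs =>
      simp only [pvRunP, Bool.and_eq_true] at h ⊢
      exact ⟨h.1, ih x xs h.2⟩

theorem pvScanA_eq (xs : List Int) : ∀ (p : Int) (cnt : Nat), 1 ≤ cnt → cnt ≤ 3 →
    pvScanA p (cnt : Int) xs = if (pvRunP (4 - cnt) p xs || pvQuad (p :: xs)) = true then 15 else 0 := by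
  induction xs with
  | nil =>
    intro p cnt h1 h3
    interval_cases cnt <;> simp [pvScanA, pvRunP, pvQuad]
  | cons x xs ih =>
    intro p cnt h1 h3
    by_cases hx : x = p + 1
    · subst hx
      interval_cases cnt
      · -- cnt = 1
        have h2 := ih (p + 1) 2 (by norm_num) (by norm_num)
        show pvScanA p 1 ((p + 1) :: xs) = _
        simp only [pvScanA, if_pos rfl]
        norm_num at h2 ⊢
        rw [h2]
        cases hr : pvRunP 2 (p + 1) xs <;>
          simp [pvRunP, pvQuad, hr]
      · -- cnt = 2
        have h2 := ih (p + 1) 3 (by norm_num) (by norm_num)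
        show pvScanA p 2 ((p + 1) :: xs) = _
        simp only [pvScanA, if_pos rfl]
        norm_num at h2 ⊢
        rw [h2]
        cases hr2 : pvRunP 2 (p + 1) xs
        · cases hr1 : pvRunP 1 (p + 1) xs <;>
            simp [pvRunP, pvQuad, hr1, hr2]
        · have hr1 := pvRunP_succ 1 (p + 1) xs hr2
          simp [pvRunP, pvQuad, hr1, hr2]
      · -- cnt = 3
        show pvScanA p 3 ((p + 1) :: xs) = _
        simp [pvScanA, pvRunP, pvQuad]
    · have h2 := ih x 1 (by norm_num) (by norm_num)
      have hne : ¬ ((x == p + 1) = true) := by simpa using hx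
      interval_cases cnt <;>
      · show pvScanA p _ (x :: xs) = _
        simp only [pvScanA, if_neg hx]
        norm_num at h2 ⊢
        rw [h2]
        cases hr : pvRunP 3 x xs <;>
          simp [pvRunP, pvQuad, hr, hne]

-- head of a strictly sorted list that contains a+1 and whose elements exceed a is a+1
theorem pvHead_succ (a b : Int) (ys : List Int)
    (hp : (b :: ys).Pairwise (· < ·)) (hab : a < b) (hmem : a + 1 ∈ b :: ys) :
    b = a + 1 := by
  rcases List.mem_cons.mp hmem with h | h
  · omega
  · have := (List.pairwise_cons.mp hp).1 (a + 1) h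
    omega

theorem pvQuad_of_mem : ∀ (l : List Int), l.Pairwise (· < ·) →
    ∀ x : Int, x ∈ l → x + 1 ∈ l → x + 2 ∈ l → x + 3 ∈ l → pvQuad l = true := by
  intro l
  induction l with
  | nil => intro _ x h; simp at h
  | cons a xs ih =>
    intro hp x h0 h1 h2 h3
    have ha := (List.pairwise_cons.mp hp).1
    have hxs := (List.pairwise_cons.mp hp).2
    by_cases hxa : x = a
    · subst hxa
      -- peel off x+1, x+2, x+3 as the next three elements
      have m1 : x + 1 ∈ xs := by
        rcases List.mem_cons.mp h1 with h | h; · omega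
        · exact h
      cases xs with
      | nil => simp at m1
      | cons b ys =>
        have hb : b = x + 1 := pvHead_succ x b ys hxs (ha b (by simp)) m1
        subst hb
        have m2 : x + 2 ∈ ys := by
          rcases List.mem_cons.mp h2 with h | h
          · simp at h
          · rcases List.mem_cons.mp h with h | h; · omega
            · exact h
        cases ys with
        | nil => simp at m2
        | cons c zs =>
          have hxs2 := (List.pairwise_cons.mp hxs).2
          have hc : c = (x + 1) + 1 := pvHead_succ (x + 1) c zs hxs2
            ((List.pairwise_cons.mp hxs).1 c (by simp)) (by simpa [add_assoc] using m2)
          subst hc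
          have m3 : x + 3 ∈ zs := by
            rcases List.mem_cons.mp h3 with h | h
            · simp at h
            · rcases List.mem_cons.mp h with h | h; · omega
              · rcases List.mem_cons.mp h with h | h; · omega
                · exact h
          cases zs with
          | nil => simp at m3
          | cons d ws =>
            have hxs3 := (List.pairwise_cons.mp hxs2).2
            have hd : d = (x + 1 + 1) + 1 := pvHead_succ (x + 1 + 1) d ws hxs3
              ((List.pairwise_cons.mp hxs2).1 d (by simp)) (by
                have : x + 3 = (x + 1 + 1) + 1 := by ring
                simpa [this] using m3)
            subst hd
            simp [pvQuad, pvRunP]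
    · -- everything lives in the tail
      have hx : x ∈ xs := by
        rcases List.mem_cons.mp h0 with h | h; · exact absurd h hxa
        · exact h
      have hgt : a < x := ha x hx
      have tail : ∀ k : Int, x + k ∈ a :: xs → 0 < k → x + k ∈ xs := by
        intro k hk hkpos
        rcases List.mem_cons.mp hk with h | h
        · omega
        · exact h
      have := ih hxs x hx (tail 1 h1 (by norm_num)) (tail 2 h2 (by norm_num)) (tail 3 h3 (by norm_num))
      simp [pvQuad, this]

theorem pvMem_of_quad : ∀ (l : List Int), pvQuad l = true →
    ∃ x : Int, x ∈ l ∧ x + 1 ∈ l ∧ x + 2 ∈ l ∧ x + 3 ∈ l := by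
  intro l
  induction l with
  | nil => intro h; simp [pvQuad] at h
  | cons a xs ih =>
    intro h
    rcases Bool.or_eq_true_iff.mp (by simpa [pvQuad] using h) with h | h
    · -- run at the head
      cases xs with
      | nil => simp [pvRunP] at h
      | cons b ys =>
        cases ys with
        | nil => simp [pvRunP] at h
        | cons c zs =>
          cases zs with
          | nil => simp [pvRunP] at h
          | cons d ws =>
            obtain ⟨hb, hc, hd⟩ : b = a + 1 ∧ c = b + 1 ∧ d = c + 1 := by
              simpa [pvRunP, and_assoc] using h
            refine ⟨a, List.mem_cons_self .., by simp [hb], ?_, ?_⟩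
            · have h2 : a + 2 = c := by omega
              simp [h2]
            · have h3 : a + 3 = d := by omega
              simp [h3]
    · obtain ⟨x, h0, h1, h2, h3⟩ := ih h
      exact ⟨x, by simp [h0], by simp [h1], by simp [h2], by simp [h3]⟩

-- ===== VERDICT (by name: the statement is the Claim_ definition above) =====
theorem calcula_pontos_sequencia_baixa_spec : Claim_equal_calcula_pontos_sequencia_baixa := by
  intro dados _
  unfold Spec_calcula_pontos_sequencia_baixa calcula_pontos_sequencia_baixa calcula_pontos_sequencia_baixa_alt
  have hofl : dados.foldl (fun acc numero => if acc.contains numero then acc else acc ++ [numero]) [] = PySem.Set.ofList dados := rfl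
  rw [hofl]
  set s := PySem.Set.ofList dados with hs
  set ord := PySem.List.sorted s (fun x => x) false with hord
  have hpair : ord.Pairwise (· < ·) := PySem.List.sorted_ofList_pairwise_lt dados
  have hmem : ∀ x : Int, x ∈ ord ↔ x ∈ s := fun x => PySem.List.mem_sorted ..
  have key : (match ord with
      | [] => (0 : Int)
      | a :: rest => pvScanA a 1 rest)
      = if pvQuad ord = true then 15 else 0 := by
    cases hO : ord with
    | nil => simp [pvQuad]
    | cons a rest =>
      show pvScanA a 1 rest = _
      have := pvScanA_eq rest a 1 (by norm_num) (by norm_num)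
      norm_num at this
      rw [this]
      cases hr : pvRunP 3 a rest <;> simp [pvQuad, hr]
  rw [key]
  have hcond : pvQuad ord = s.any (fun x => s.contains (x + 1) && s.contains (x + 2) && s.contains (x + 3)) := by
    apply Bool.coe_iff_coe.mp
    constructor
    · intro h
      obtain ⟨x, h0, h1, h2, h3⟩ := pvMem_of_quad ord h
      refine List.any_eq_true.mpr ⟨x, (hmem x).mp h0, ?_⟩
      simp only [Bool.and_eq_true]
      exact ⟨⟨List.contains_iff_mem.mpr ((hmem _).mp h1),
        List.contains_iff_mem.mpr ((hmem _).mp h2)⟩,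
        List.contains_iff_mem.mpr ((hmem _).mp h3)⟩
    · intro h
      obtain ⟨x, hx, hq⟩ := List.any_eq_true.mp h
      simp only [Bool.and_eq_true] at hq
      exact pvQuad_of_mem ord hpair x ((hmem x).mpr hx)
        ((hmem _).mpr (List.contains_iff_mem.mp hq.1.1))
        ((hmem _).mpr (List.contains_iff_mem.mp hq.1.2))
        ((hmem _).mpr (List.contains_iff_mem.mp hq.2))
  rw [hcond]
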